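-- pv_equiv track=rewrite | github.com/Pasha-006/Leetcode_solutions_cpp | Arrays/make_equal_elements.py | solve
-- ===== SOURCE A (Python) =====
-- def solve(A, B):
--     update_array=[]
--     for i in range(0,len(A)):
--         update_array.append(dict())
--     for i in range(0,len(A)):
--         update_array[i][A[i]+B]=0
--         update_array[i][A[i]-B]=0
--         update_array[i][A[i]]=0
--
--
--     for key in update_array[0]:
--         flag=1
--         for k in range(1,len(A)):
--             if key in update_array[k].keys():
--                 flag+=1
--         if flag==len(A):
--             return 1
--     return 0
-- ===== SOURCE B (Python) =====
-- def solve(A, B):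
--     # All elements can meet at a common value iff the distinct values of A,
--     # sorted, form one of the patterns: {v}, {v, v+b}, {v, v+2b}, or
--     # {v-b, v, v+b} with b = abs(B).  (Any common target c forces every
--     # distinct value into {c-b, c, c+b}.)
--     s = sorted(set(A))
--     b = abs(B)
--     if len(s) == 1:
--         return 1
--     if len(s) == 2:
--         return 1 if s[1] - s[0] in (b, 2 * b) else 0
--     if len(s) == 3:
--         return 1 if s[1] - s[0] == b and s[2] - s[1] == b else 0
--     return 0
-- ===== Notes on version B (the rewrite author's own statement) =====
-- stated objective: alternative
-- what changed: B abandons A's per-element reachable-value tables and candidate probing entirely: it deduplicates and sorts A once and decides by a closed-form case analysis on the number of distinct values (1; 2 with gap b or 2b; 3 with equal gaps b,b where b=abs(B)), which characterises when a common target exists.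
import Mathlib
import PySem

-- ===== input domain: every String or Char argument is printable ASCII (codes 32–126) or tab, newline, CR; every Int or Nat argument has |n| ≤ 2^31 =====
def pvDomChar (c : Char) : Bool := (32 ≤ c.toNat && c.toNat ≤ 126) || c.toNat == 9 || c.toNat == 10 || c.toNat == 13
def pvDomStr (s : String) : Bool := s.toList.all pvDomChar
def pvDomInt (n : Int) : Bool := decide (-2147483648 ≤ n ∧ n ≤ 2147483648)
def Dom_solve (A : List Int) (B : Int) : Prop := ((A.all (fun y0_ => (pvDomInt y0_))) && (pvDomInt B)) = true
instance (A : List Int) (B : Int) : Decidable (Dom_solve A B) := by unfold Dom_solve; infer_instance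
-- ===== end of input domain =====

-- B replaces A's reachable-value tables and candidate probing by a closed-form case
-- analysis on the sorted distinct values of A; objective: alternative.

-- ===== PORT A =====
def solve (A : List Int) (B : Int) : Int :=
  -- update_array=[]; for i in range(0,len(A)): update_array.append(dict())
  let update0 : List (PySem.Dict Int Int) :=
    (PySem.List.pyRange 0 A.length 1).foldl (fun acc _ => acc ++ [PySem.Dict.empty]) []
  -- for i in range(0,len(A)): update_array[i][A[i]+B]=0; update_array[i][A[i]-B]=0; update_array[i][A[i]]=0
  -- (i ranges over 0..len(A)-1, so A[i] and update_array[i] are in range and pyGetD/set are exact here)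
  let update : List (PySem.Dict Int Int) :=
    (PySem.List.pyRange 0 A.length 1).foldl (fun u i =>
      let a := PySem.List.pyGetD A i 0
      let d := PySem.List.pyGetD u i PySem.Dict.empty
      u.set i.toNat (((d.insert (a + B) 0).insert (a - B) 0).insert a 0)) update0
  -- for key in update_array[0]: …  (update_array[0] raises IndexError when A = []; excluded by Pre_)
  match update.head? with
  | none => 0
  | some d0 =>
    let res : Option Int := d0.keys.foldl (fun res key =>
      match res with
      | some v => some v          -- the function has already returned 1
      | none =>
        -- flag=1; for k in range(1,len(A)): if key in update_array[k].keys(): flag+=1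
        let flag : Int := (PySem.List.pyRange 1 A.length 1).foldl (fun flag k =>
          if (PySem.List.pyGetD update k PySem.Dict.empty).contains key then flag + 1 else flag) 1
        if flag = (A.length : Int) then some 1 else none) none
    res.getD 0

-- ===== PORT B =====
-- s = sorted(set(A)); b = abs(B); then the if/elif chain on len(s)
def solve_alt (A : List Int) (B : Int) : Int :=
  match PySem.List.sorted (PySem.Set.ofList A) (fun x => x) false with
  | [_] => 1
  | [x, y] => if y - x = |B| ∨ y - x = 2 * |B| then 1 else 0
  | [x, y, z] => if y - x = |B| ∧ z - y = |B| then 1 else 0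
  | _ => 0

-- ===== PRECONDITION & SPEC =====
-- A raises IndexError on empty A (indexing update_array[0]); nothing else is excluded.
def Pre_solve (A : List Int) (B : Int) : Prop := A ≠ []
instance (A : List Int) (B : Int) : Decidable (Pre_solve A B) := by unfold Pre_solve; infer_instance
def pvWitness_solve : List Int × Int := ([2, 4, 6], 2)

def Spec_solve (A : List Int) (B : Int) (out : Int) : Prop := out = solve_alt A B
instance (A : List Int) (B : Int) (out : Int) : Decidable (Spec_solve A B out) := by unfold Spec_solve; infer_instance

-- ===== CLAIM (what is proved, stated in full; the proofs are below) =====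
def Claim_equal_solve : Prop := ∀ (A : List Int) (B : Int), Dom_solve A B → Pre_solve A B → Spec_solve A B (solve A B)

-- ===== LEMMAS AND PROOFS =====

-- the dict A builds for element a: keys {a+B, a-B, a}
def pvDictOf (B a : Int) : PySem.Dict Int Int :=
  ((PySem.Dict.empty.insert (a + B) 0).insert (a - B) 0).insert a 0

theorem pv_contains_dictOf (B a c : Int) :
    (pvDictOf B a).contains c = (c == a + B || c == a - B || c == a) := by
  simp only [pvDictOf, PySem.Dict.contains_insert, PySem.Dict.contains_empty, Bool.or_false]
  cases hc1 : c == a + B <;> cases hc2 : c == a - B <;> cases hc3 : c == a <;> simp_all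

theorem pv_keys_dictOf (B a : Int) :
    (pvDictOf B a).keys = if B = 0 then [a] else [a + B, a - B, a] := by
  by_cases hB : B = 0
  · subst hB
    simp only [pvDictOf, add_zero, sub_zero, if_pos rfl]
    rw [PySem.Dict.keys_insert_of_contains _ _ (by simp [PySem.Dict.contains_insert]),
        PySem.Dict.keys_insert_of_contains _ _ (by simp [PySem.Dict.contains_insert]),
        PySem.Dict.keys_insert_of_not_contains _ _ (by simp), PySem.Dict.keys_empty]
    simp
  · simp only [pvDictOf, if_neg hB]
    rw [PySem.Dict.keys_insert_of_not_contains _ _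
          (by simp [PySem.Dict.contains_insert]; omega),
        PySem.Dict.keys_insert_of_not_contains _ _
          (by simp [PySem.Dict.contains_insert]; omega),
        PySem.Dict.keys_insert_of_not_contains _ _ (by simp), PySem.Dict.keys_empty]
    simp

theorem pv_opt_fold_some (q : Int → Prop) [DecidablePred q] (v : Int) :
    ∀ (l : List Int),
    l.foldl (fun res key =>
      match res with
      | some w => some w
      | none => if q key then some 1 else none) (some v) = some v := by
  intro l; induction l with
  | nil => rfl
  | cons h t ih => simpa [List.foldl] using ih

theorem pv_opt_fold (q : Int → Prop) [DecidablePred q] :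
    ∀ (l : List Int),
    l.foldl (fun res key =>
      match res with
      | some w => some w
      | none => if q key then some 1 else none) (none : Option Int)
    = if l.any (fun k => decide (q k)) then some 1 else none := by
  intro l; induction l with
  | nil => rfl
  | cons h t ih =>
    by_cases hq : q h
    · simp [List.foldl, hq, pv_opt_fold_some q]
    · simpa [List.foldl, hq] using ih

theorem pv_any_congr_mem (l : List Int) (p q : Int → Bool)
    (h : ∀ x ∈ l, p x = q x) : l.any p = l.any q := by
  induction l with
  | nil => rfl
  | cons a t ih =>
    simp only [List.any_cons, h a (by simp), ih (fun x hx => h x (by simp [hx]))]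

theorem pv_append_fold {α β : Type} (x : β) :
    ∀ (l : List α) (init : List β),
    l.foldl (fun acc _ => acc ++ [x]) init = init ++ l.map (fun _ => x) := by
  intro l
  induction l with
  | nil => simp
  | cons h t ih => intro init; simp [List.foldl, ih]

-- the second loop fills position k, …, len-1 of the list of dicts, in order
theorem pv_fill (A : List Int) (B : Int) :
    ∀ (n k : Nat), A.length - k = n → ∀ (pre : List (PySem.Dict Int Int)), pre.length = k →
    (PySem.List.pyRange (k : Int) A.length 1).foldl (fun u i =>
      let a := PySem.List.pyGetD A i 0
      let d := PySem.List.pyGetD u i PySem.Dict.empty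
      u.set i.toNat (((d.insert (a + B) 0).insert (a - B) 0).insert a 0))
      (pre ++ (A.drop k).map (fun _ => PySem.Dict.empty))
    = pre ++ (A.drop k).map (pvDictOf B) := by
  intro n
  induction n with
  | zero =>
    intro k hk pre hpre
    have hle : A.length ≤ k := by omega
    have hr : PySem.List.pyRange (k : Int) A.length 1 = [] := by
      rw [PySem.List.pyRange_one]
      have : ((A.length : Int) - k).toNat = 0 := by omega
      simp [this]
    rw [hr, List.drop_eq_nil_of_le hle]
    simp
  | succ n ih =>
    intro k hk pre hpre
    have hklt : k < A.length := by omega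
    have hkltz : (k : Int) < A.length := by exact_mod_cast hklt
    rw [PySem.List.pyRange_one_cons hkltz, List.foldl_cons]
    have hdrop : A.drop k = A[k] :: A.drop (k + 1) := List.drop_eq_getElem_cons hklt
    have hgetA : PySem.List.pyGetD A (k : Int) 0 = A[k] := by
      rw [PySem.List.pyGetD_eq_getElem A 0 (by positivity) (by exact_mod_cast hklt)]
      simp
    have hu : pre ++ (A.drop k).map (fun _ => PySem.Dict.empty)
        = pre ++ PySem.Dict.empty :: (A.drop (k+1)).map (fun _ => PySem.Dict.empty) := by
      rw [hdrop, List.map_cons]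
    have hgetU : PySem.List.pyGetD
        (pre ++ PySem.Dict.empty :: (A.drop (k+1)).map (fun _ => PySem.Dict.empty)) (k : Int)
        PySem.Dict.empty = PySem.Dict.empty := by
      rw [PySem.List.pyGetD_of_nonneg _ _ (by positivity)]
      simp [List.getD, ← hpre]
    have hset : (pre ++ PySem.Dict.empty :: (A.drop (k+1)).map (fun _ => PySem.Dict.empty)).set
        (Int.toNat (k : Int)) (pvDictOf B A[k])
        = (pre ++ [pvDictOf B A[k]]) ++ (A.drop (k+1)).map (fun _ => PySem.Dict.empty) := by
      rw [List.set_append]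
      simp [← hpre]
    rw [hu]
    simp only [hgetA, hgetU]
    rw [show (((PySem.Dict.empty.insert (A[k] + B) 0).insert (A[k] - B) 0).insert A[k] 0)
        = pvDictOf B A[k] from rfl, hset]
    have hcast : (k : Int) + 1 = ((k + 1 : Nat) : Int) := by push_cast; ring
    rw [hcast]
    have := ih (k+1) (by omega) (pre ++ [pvDictOf B A[k]]) (by simp [hpre])
    rw [this, hdrop, List.map_cons]
    simp [List.append_assoc]

theorem pv_update_eq (A : List Int) (B : Int) :
    ((PySem.List.pyRange 0 A.length 1).foldl (fun u i =>
      let a := PySem.List.pyGetD A i 0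
      let d := PySem.List.pyGetD u i PySem.Dict.empty
      u.set i.toNat (((d.insert (a + B) 0).insert (a - B) 0).insert a 0))
      ((PySem.List.pyRange 0 A.length 1).foldl (fun acc _ => acc ++ [PySem.Dict.empty]) []))
    = A.map (pvDictOf B) := by
  have h0 : (PySem.List.pyRange 0 A.length 1).foldl
        (fun acc _ => acc ++ [(PySem.Dict.empty : PySem.Dict Int Int)]) []
      = A.map (fun _ => (PySem.Dict.empty : PySem.Dict Int Int)) := by
    rw [pv_append_fold]
    rw [List.map_const', List.map_const', PySem.List.length_pyRange_one]
    simp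
  rw [h0]
  have := pv_fill A B A.length 0 (by omega) [] rfl
  simpa using this

theorem pv_count_fold (p : Int → Bool) :
    ∀ (l : List Int) (s : Int),
    l.foldl (fun f k => if p k then f + 1 else f) s = s + l.countP p := by
  intro l
  induction l with
  | nil => simp
  | cons h t ih => intro s; by_cases hp : p h <;> simp [List.foldl, hp, ih] <;> ring

-- for a key of the first dict, "flag == len(A)" says every later element's dict has the key,
-- which is exactly the condition that every element reaches the key
theorem pv_flag_iff (B a0 : Int) (rest : List Int) (key : Int)
    (hkey : key ∈ (pvDictOf B a0).keys) :
    ((PySem.List.pyRange 1 ((a0 :: rest).length : Int)).foldl (fun flag k =>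
        if (PySem.List.pyGetD ((a0 :: rest).map (pvDictOf B)) k PySem.Dict.empty).contains key
        then flag + 1 else flag) 1
      = (((a0 :: rest).length : Int)))
    ↔ ((a0 :: rest).all (fun a => a - key == 0 || a - key == B || a - key == -B)) = true := by
  have hcond : ∀ a : Int, ((pvDictOf B a).contains key)
      = (a - key == 0 || a - key == B || a - key == -B) := by
    intro a; rw [pv_contains_dictOf, Bool.eq_iff_iff]; simp; omega
  have ha0 : (a0 - key == 0 || a0 - key == B || a0 - key == -B) = true := by
    rw [pv_keys_dictOf] at hkey
    by_cases hB : B = 0 <;> simp [hB] at hkey <;> simp <;> omega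
  have hget : ∀ (j : Nat) (hj : j < rest.length),
      PySem.List.pyGetD ((a0 :: rest).map (pvDictOf B)) (((j + 1 : Nat) : Int)) PySem.Dict.empty
        = pvDictOf B (rest[j]'hj) := by
    intro j hj
    rw [PySem.List.pyGetD_eq_getElem _ _ (by positivity) (by simp; omega)]
    simp
  rw [pv_count_fold]
  have hlen : (PySem.List.pyRange 1 ((a0 :: rest).length : Int)).length = rest.length := by
    rw [PySem.List.length_pyRange_one]; simp
  have hcle := List.countP_le_length
    (p := fun k => (PySem.List.pyGetD ((a0 :: rest).map (pvDictOf B)) k PySem.Dict.empty).contains key)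
    (l := PySem.List.pyRange 1 ((a0 :: rest).length : Int))
  rw [hlen] at hcle
  constructor
  · intro h
    have hcnt : (PySem.List.pyRange 1 ((a0 :: rest).length : Int)).countP
        (fun k => (PySem.List.pyGetD ((a0 :: rest).map (pvDictOf B)) k PySem.Dict.empty).contains key)
        = rest.length := by
      simp only [List.length_cons] at h ⊢
      omega
    have hall := List.countP_eq_length.mp (hcnt.trans hlen.symm)
    rw [List.all_cons, ha0, Bool.true_and, List.all_eq_true]
    intro a hmem
    obtain ⟨j, hj, rfl⟩ := List.mem_iff_getElem.mp hmem
    have hk : (((j + 1 : Nat) : Int)) ∈ PySem.List.pyRange 1 ((a0 :: rest).length : Int) := by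
      rw [PySem.List.mem_pyRange_one]
      constructor <;> simp <;> omega
    have := hall _ hk
    rw [hget j hj, hcond] at this
    exact this
  · intro h
    have hall : ∀ k ∈ PySem.List.pyRange 1 ((a0 :: rest).length : Int),
        ((PySem.List.pyGetD ((a0 :: rest).map (pvDictOf B)) k PySem.Dict.empty).contains key) = true := by
      intro k hk
      rw [PySem.List.mem_pyRange_one] at hk
      have hj : k.toNat - 1 < rest.length := by simp at hk; omega
      have hkeq : k = (((k.toNat - 1) + 1 : Nat) : Int) := by omega
      rw [hkeq, hget _ hj, hcond]
      rw [List.all_eq_true] at h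
      exact h _ (List.mem_cons_of_mem a0 (List.getElem_mem hj))
    have := List.countP_eq_length.mpr hall
    rw [this, hlen]
    simp only [List.length_cons]
    push_cast
    ring

-- A on a nonempty list, with the two folds replaced by their characterizations
theorem pv_solve_eq (B a0 : Int) (rest : List Int) :
    solve (a0 :: rest) B =
    if ((pvDictOf B a0).keys.any (fun key =>
        decide ((PySem.List.pyRange 1 ((a0 :: rest).length : Int)).foldl (fun flag k =>
          if (PySem.List.pyGetD ((a0 :: rest).map (pvDictOf B)) k PySem.Dict.empty).contains key
          then flag + 1 else flag) 1 = (((a0 :: rest).length : Int)))))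
    then 1 else 0 := by
  unfold solve
  simp only []
  rw [pv_update_eq (a0 :: rest) B]
  rw [List.map_cons, List.head?_cons]
  simp only []
  rw [pv_opt_fold (fun key =>
      (PySem.List.pyRange 1 ((a0 :: rest).length : Int)).foldl (fun flag k =>
        if (PySem.List.pyGetD (pvDictOf B a0 :: rest.map (pvDictOf B)) k PySem.Dict.empty).contains key
        then flag + 1 else flag) 1 = (((a0 :: rest).length : Int)))]
  split_ifs with h1 h2 h2 <;> simp_all

theorem pv_any_keys (B a0 : Int) (g : Int → Bool) :
    (pvDictOf B a0).keys.any g = ([a0 + B, a0 - B, a0].any g) := by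
  rw [pv_keys_dictOf]
  by_cases hB : B = 0
  · simp only [hB, if_pos rfl, add_zero, sub_zero, List.any_cons, List.any_nil]
    cases h : g a0 <;> simp [h]
  · simp [hB]

-- A's whole computation reduces to: is there a candidate c ∈ {a0+B, a0-B, a0}
-- reached by every element?
theorem pv_solve_candidates (B a0 : Int) (rest : List Int) :
    solve (a0 :: rest) B =
    if ([a0 + B, a0 - B, a0].any (fun c =>
        (a0 :: rest).all (fun a => a - c == 0 || a - c == B || a - c == -B)))
    then 1 else 0 := by
  rw [pv_solve_eq]
  have hQ : (pvDictOf B a0).keys.any (fun key =>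
        decide ((PySem.List.pyRange 1 ((a0 :: rest).length : Int)).foldl (fun flag k =>
          if (PySem.List.pyGetD ((a0 :: rest).map (pvDictOf B)) k PySem.Dict.empty).contains key
          then flag + 1 else flag) 1 = (((a0 :: rest).length : Int))))
      = (pvDictOf B a0).keys.any (fun c =>
          (a0 :: rest).all (fun a => a - c == 0 || a - c == B || a - c == -B)) := by
    apply pv_any_congr_mem
    intro key hk
    rw [Bool.eq_iff_iff, decide_eq_true_iff]
    exact pv_flag_iff B a0 rest key hk
  rw [hQ, pv_any_keys]

-- B's case analysis agrees with the candidate check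
theorem pv_cond_of (B a0 c : Int) (rest : List Int)
    (hc : c = a0 + B ∨ c = a0 - B ∨ c = a0)
    (h : ∀ a ∈ (a0 :: rest), a - c = 0 ∨ a - c = B ∨ a - c = -B) :
    ([a0 + B, a0 - B, a0].any (fun c =>
      (a0 :: rest).all (fun a => a - c == 0 || a - c == B || a - c == -B))) = true := by
  rw [List.any_eq_true]
  refine ⟨c, ?_, ?_⟩
  · rcases hc with rfl | rfl | rfl <;> simp
  · rw [List.all_eq_true]
    intro a ha
    simp only [Bool.or_eq_true, beq_iff_eq]
    exact or_assoc.mpr (h a ha)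

theorem pv_cond_elim (B a0 : Int) (rest : List Int)
    (h : ([a0 + B, a0 - B, a0].any (fun c =>
      (a0 :: rest).all (fun a => a - c == 0 || a - c == B || a - c == -B))) = true) :
    ∃ c, ∀ a ∈ (a0 :: rest), a - c = 0 ∨ a - c = B ∨ a - c = -B := by
  rw [List.any_eq_true] at h
  obtain ⟨c, _, hall⟩ := h
  refine ⟨c, ?_⟩
  intro a ha
  have := List.all_eq_true.1 hall a ha
  simp only [Bool.or_eq_true, beq_iff_eq] at this
  exact or_assoc.mp this

theorem pv_alt_eq (B a0 : Int) (rest : List Int) :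
    (if ([a0 + B, a0 - B, a0].any (fun c =>
        (a0 :: rest).all (fun a => a - c == 0 || a - c == B || a - c == -B)))
     then (1 : Int) else 0) = solve_alt (a0 :: rest) B := by
  obtain ⟨b, hb0, hbs, hbe⟩ : ∃ b : Int, 0 ≤ b ∧ (B = b ∨ B = -b) ∧ |B| = b := by
    refine ⟨|B|, abs_nonneg B, ?_, rfl⟩
    rcases abs_choice B with h | h
    · exact Or.inl h.symm
    · exact Or.inr (by omega)
  unfold solve_alt
  rw [hbe]
  generalize hs : PySem.List.sorted (PySem.Set.ofList (a0 :: rest)) (fun x => x) false = s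
  have hpw : s.Pairwise (· < ·) := by
    rw [← hs]; exact PySem.List.sorted_ofList_pairwise_lt _
  have hmem : ∀ x : Int, x ∈ s ↔ x ∈ (a0 :: rest) := by
    intro x
    rw [← hs, PySem.List.mem_sorted, PySem.Set.mem_ofList]
  have ha0 : a0 ∈ s := (hmem a0).2 (by simp)
  clear hs
  match s, hpw, hmem, ha0 with
  | [], _, _, ha0 => exact absurd ha0 (by simp)
  | [x], _, hmem, ha0 =>
    -- one distinct value: everything equals a0; target c = a0 works
    have hax : a0 = x := by simpa using ha0
    have hcond := pv_cond_of B a0 a0 rest (Or.inr (Or.inr rfl)) (by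
      intro a ha
      have : a = x := by simpa using (hmem a).2 ha
      omega)
    rw [if_pos hcond]
  | [x, y], hpw, hmem, ha0 =>
    have hxy : x < y := by simpa using hpw
    have hax : a0 = x ∨ a0 = y := by simpa using ha0
    have hel : ∀ a ∈ (a0 :: rest), a = x ∨ a = y := by
      intro a ha; simpa using (hmem a).2 ha
    have hxA : x ∈ (a0 :: rest) := (hmem x).1 (by simp)
    have hyA : y ∈ (a0 :: rest) := (hmem y).1 (by simp)
    show _ = (if y - x = b ∨ y - x = 2 * b then (1 : Int) else 0)
    by_cases hc : y - x = b ∨ y - x = 2 * b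
    · rw [if_pos hc]
      rcases hc with hgap | hgap
      · -- gap b: target the larger value y
        have hcond := pv_cond_of B a0 y rest
          (by rcases hax with rfl | rfl <;> rcases hbs with rfl | hB <;> omega)
          (by intro a ha; rcases hel a ha with rfl | rfl <;> rcases hbs with rfl | hB <;> omega)
        rw [if_pos hcond]
      · -- gap 2b: target the midpoint x + b
        have hcond := pv_cond_of B a0 (x + b) rest
          (by rcases hax with rfl | rfl <;> rcases hbs with rfl | hB <;> omega)
          (by intro a ha; rcases hel a ha with rfl | rfl <;> rcases hbs with rfl | hB <;> omega)
        rw [if_pos hcond]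
    · rw [if_neg hc]
      rw [if_neg]
      intro h
      obtain ⟨c, hall⟩ := pv_cond_elim B a0 rest h
      have hx := hall x hxA
      have hy := hall y hyA
      rcases hbs with rfl | hB <;> omega
  | [x, y, z], hpw, hmem, ha0 =>
    have hxy : x < y := (List.pairwise_cons.1 hpw).1 y (by simp)
    have hyz : y < z := (List.pairwise_cons.1 (List.pairwise_cons.1 hpw).2).1 z (by simp)
    have hax : a0 = x ∨ a0 = y ∨ a0 = z := by simpa using ha0
    have hel : ∀ a ∈ (a0 :: rest), a = x ∨ a = y ∨ a = z := by
      intro a ha; simpa using (hmem a).2 ha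
    have hxA : x ∈ (a0 :: rest) := (hmem x).1 (by simp)
    have hyA : y ∈ (a0 :: rest) := (hmem y).1 (by simp)
    have hzA : z ∈ (a0 :: rest) := (hmem z).1 (by simp)
    show _ = (if y - x = b ∧ z - y = b then (1 : Int) else 0)
    by_cases hc : y - x = b ∧ z - y = b
    · rw [if_pos hc]
      -- equal gaps b: target the middle value y
      obtain ⟨h1, h2⟩ := hc
      have hcond := pv_cond_of B a0 y rest
        (by rcases hax with rfl | rfl | rfl <;> rcases hbs with rfl | hB <;> omega)
        (by intro a ha; rcases hel a ha with rfl | rfl | rfl <;> rcases hbs with rfl | hB <;> omega)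
      rw [if_pos hcond]
    · rw [if_neg hc]
      rw [if_neg]
      intro h
      obtain ⟨c, hall⟩ := pv_cond_elim B a0 rest h
      have hx := hall x hxA
      have hy := hall y hyA
      have hz := hall z hzA
      rcases hbs with rfl | hB <;> omega
  | x :: y :: z :: w :: t, hpw, hmem, _ =>
    -- four strictly increasing distinct values cannot all lie in {c-b, c, c+b}
    show _ = (0 : Int)
    rw [if_neg]
    intro h
    obtain ⟨c, hall⟩ := pv_cond_elim B a0 rest h
    have hx := hall x ((hmem x).1 (by simp))
    have hy := hall y ((hmem y).1 (by simp))
    have hz := hall z ((hmem z).1 (by simp))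
    have hw := hall w ((hmem w).1 (by simp))
    have h1 : x < y := (List.pairwise_cons.1 hpw).1 y (by simp)
    have h2 : y < z := (List.pairwise_cons.1 (List.pairwise_cons.1 hpw).2).1 z (by simp)
    have h3 : z < w :=
      (List.pairwise_cons.1 (List.pairwise_cons.1 (List.pairwise_cons.1 hpw).2).2).1 w (by simp)
    omega

theorem pv_main (B a0 : Int) (rest : List Int) :
    solve (a0 :: rest) B = solve_alt (a0 :: rest) B := by
  rw [pv_solve_candidates, pv_alt_eq]

-- ===== VERDICT (by name: the statement is the Claim_ definition above) =====
theorem solve_spec : Claim_equal_solve := by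
  intro A B _ hpre
  unfold Spec_solve
  match A with
  | [] => exact absurd rfl hpre
  | a0 :: rest => exact pv_main B a0 rest
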